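-- pv_equiv track=rewrite | github.com/HeitorRoriz/skyt_experiment | src/transformations/property_explainers.py | _parse_char_class_content
-- ===== SOURCE A (Python) =====
-- from typing import Dict, Any, Optional, List, Set
--
-- def _parse_char_class_content(content: str) -> Set[str]:
--     tokens: Set[str] = set()
--     i = 0
--     while i < len(content):
--         char = content[i]
--         if char == '^':
--             i += 1
--             continue
--         if char == '\\' and i + 1 < len(content):
--             tokens.add('\\' + content[i + 1])
--             i += 2
--             continue
--         if i + 2 < len(content) and content[i + 1] == '-':
--             tokens.add(f"{content[i]}-{content[i + 2]}")
--             i += 3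
--             continue
--         tokens.add(char)
--         i += 1
--     return tokens
-- ===== SOURCE B (Python) =====
-- import re
--
-- _TOKEN_RE = re.compile(r'\^|\\.|.-.|.', re.DOTALL)
--
-- def _parse_char_class_content(content: str):
--     # Regex scan: ordered alternation mirrors the manual cursor's branch
--     # precedence (lone caret skipped, escape before range before single char).
--     return {m.group() for m in _TOKEN_RE.finditer(content) if m.group() != '^'}
-- ===== Notes on version B (the rewrite author's own statement) =====
-- stated objective: idiomatic
-- what changed: Replaces the manual while-loop cursor with i += 1/2/3 jumps by a single precompiled regex scan (re.finditer(r'\^|\\.|.-.|.', content, re.DOTALL)) whose ordered alternation encodes the branch precedence, collecting every match except the lone caret in a set comprehension.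
import Mathlib
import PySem

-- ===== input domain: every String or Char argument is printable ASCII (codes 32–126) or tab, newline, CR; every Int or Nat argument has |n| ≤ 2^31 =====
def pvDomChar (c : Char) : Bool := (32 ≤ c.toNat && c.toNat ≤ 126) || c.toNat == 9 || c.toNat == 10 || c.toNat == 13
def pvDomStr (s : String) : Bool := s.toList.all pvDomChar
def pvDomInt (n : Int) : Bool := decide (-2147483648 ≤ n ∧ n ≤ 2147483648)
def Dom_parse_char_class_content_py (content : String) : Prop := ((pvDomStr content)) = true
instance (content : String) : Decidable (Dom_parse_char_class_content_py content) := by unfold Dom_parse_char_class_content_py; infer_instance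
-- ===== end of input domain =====

-- B replaces A's manual cursor (i += 1/2/3) with a single regex scan
-- r'\^|\\.|.-.|.' whose ordered alternation carries the branch precedence;
-- objective: idiomatic (same cost).

-- ===== PORT A =====
-- A's while loop over index i, transcribed as recursion on the suffix of the
-- character list (i < len ↔ suffix nonempty; content[i]/[i+1]/[i+2] are the
-- first one/two/three characters of the suffix); same branch order, same
-- incremental set of tokens.
def pvA_loop : List Char → PySem.Set String → PySem.Set String
  | [], tokens => tokens
  | c :: rest, tokens =>
    if c = '^' then pvA_loop rest tokens
    else
      match rest with
      | d :: rest2 =>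
        if c = '\\' then pvA_loop rest2 (PySem.Set.add tokens (String.ofList ['\\', d]))
        else
          match rest2 with
          | e :: rest3 =>
            if d = '-' then pvA_loop rest3 (PySem.Set.add tokens (String.ofList [c, '-', e]))
            else pvA_loop (d :: e :: rest3) (PySem.Set.add tokens (String.ofList [c]))
          | [] => pvA_loop [d] (PySem.Set.add tokens (String.ofList [c]))
      | [] => pvA_loop [] (PySem.Set.add tokens (String.ofList [c]))

def parse_char_class_content_py (content : String) : List String :=
  pvA_loop content.toList PySem.Set.empty

-- ===== PORT B =====
-- Hand port of `re.finditer(r'\^|\\.|.-.|.', content, re.DOTALL)`: at each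
-- position the first alternative that matches wins ('\^', then '\\.', then
-- '.-.', then '.'), matching resumes after the match — exact for this fixed
-- pattern (DOTALL: '.' is any character).
def pvB_scan : List Char → List String
  | [] => []
  | c :: rest =>
    if c = '^' then "^" :: pvB_scan rest
    else if c = '\\' then
      match rest with
      | d :: rest2 => String.ofList ['\\', d] :: pvB_scan rest2
      | [] => String.ofList [c] :: pvB_scan []
    else
      match rest with
      | d :: e :: rest3 =>
        if d = '-' then String.ofList [c, '-', e] :: pvB_scan rest3
        else String.ofList [c] :: pvB_scan (d :: e :: rest3)
      | [d] => String.ofList [c] :: pvB_scan [d]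
      | [] => String.ofList [c] :: pvB_scan []

def parse_char_class_content_py_alt (content : String) : List String :=
  PySem.Set.ofList ((pvB_scan content.toList).filter (fun s => s != "^"))

-- ===== PRECONDITION & SPEC =====
def Spec_parse_char_class_content_py (content : String) (out : List String) : Prop := out = parse_char_class_content_py_alt content
instance (content : String) (out : List String) : Decidable (Spec_parse_char_class_content_py content out) := by unfold Spec_parse_char_class_content_py; infer_instance

-- ===== CLAIM (what is proved, stated in full; the proofs are below) =====
def Claim_equal_parse_char_class_content_py : Prop := ∀ (content : String), Dom_parse_char_class_content_py content → Spec_parse_char_class_content_py content (parse_char_class_content_py content)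

-- ===== LEMMAS AND PROOFS =====

theorem pv_ne1 (c : Char) (h : c ≠ '^') : (String.ofList [c] != "^") = true := by
  simp only [bne_iff_ne, ne_eq]
  intro he
  have := congrArg String.toList he
  simp at this
  exact h this

theorem pv_ne2 (c d : Char) : (String.ofList [c, d] != "^") = true := by
  simp only [bne_iff_ne, ne_eq]
  intro he
  have := congrArg String.toList he
  simp at this

theorem pv_ne3 (c d e : Char) : (String.ofList [c, d, e] != "^") = true := by
  simp only [bne_iff_ne, ne_eq]
  intro he
  have := congrArg String.toList he
  simp at this

theorem pv_scan_caret (rest : List Char) : pvB_scan ('^' :: rest) = "^" :: pvB_scan rest := by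
  rw [pvB_scan.eq_def]; simp

theorem pv_scan_esc (d : Char) (rest2 : List Char) :
    pvB_scan ('\\' :: d :: rest2) = String.ofList ['\\', d] :: pvB_scan rest2 := by
  rw [pvB_scan.eq_def]; simp

theorem pv_scan_range (c e : Char) (rest3 : List Char) (h1 : c ≠ '^') (h2 : c ≠ '\\') :
    pvB_scan (c :: '-' :: e :: rest3) = String.ofList [c, '-', e] :: pvB_scan rest3 := by
  rw [pvB_scan.eq_def]; simp [h1, h2]

theorem pv_scan_single3 (c d e : Char) (rest3 : List Char) (h1 : c ≠ '^') (h2 : c ≠ '\\')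
    (h3 : d ≠ '-') : pvB_scan (c :: d :: e :: rest3) = String.ofList [c] :: pvB_scan (d :: e :: rest3) := by
  rw [pvB_scan.eq_def]; simp [h1, h2, h3]

theorem pv_scan_single2 (c d : Char) (h1 : c ≠ '^') (h2 : c ≠ '\\') :
    pvB_scan [c, d] = String.ofList [c] :: pvB_scan [d] := by
  rw [pvB_scan.eq_def]; simp [h1, h2]

theorem pv_scan_single1 (c : Char) (h1 : c ≠ '^') :
    pvB_scan [c] = String.ofList [c] :: pvB_scan [] := by
  rw [pvB_scan.eq_def]
  by_cases h2 : c = '\\' <;> simp [h1, h2]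

theorem pv_loop_eq_scan (cs : List Char) (tokens : PySem.Set String) :
    pvA_loop cs tokens =
      ((pvB_scan cs).filter (fun s => s != "^")).foldl PySem.Set.add tokens := by
  fun_induction pvA_loop cs tokens with
  | case1 => rfl
  | case2 rest tokens ih => rw [pv_scan_caret]; simpa using ih
  | case3 tokens d rest2 h ih => rw [pv_scan_esc]; simpa [List.filter_cons, pv_ne2] using ih
  | case4 c tokens h1 h2 e rest3 ih =>
      rw [pv_scan_range c e rest3 h1 h2]; simpa [List.filter_cons, pv_ne3] using ih
  | case5 c tokens h1 d h2 e rest3 h3 ih =>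
      rw [pv_scan_single3 c d e rest3 h1 h2 h3]
      simpa [List.filter_cons, pv_ne1 c h1] using ih
  | case6 c tokens h1 d h2 ih =>
      rw [pv_scan_single2 c d h1 h2]; simpa [List.filter_cons, pv_ne1 c h1] using ih
  | case7 c tokens h1 ih =>
      rw [pv_scan_single1 c h1]; simpa [List.filter_cons, pv_ne1 c h1] using ih

-- ===== VERDICT (by name: the statement is the Claim_ definition above) =====
theorem parse_char_class_content_py_spec : Claim_equal_parse_char_class_content_py := by
  intro content _
  unfold Spec_parse_char_class_content_py parse_char_class_content_py parse_char_class_content_py_alt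
  rw [PySem.Set.ofList_eq_foldl]
  exact pv_loop_eq_scan _ _
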